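-- pv_equiv track=rewrite | github.com/yudhisthereal/Private-Surveillence-MaixCAM | main.py | flat_keypoints_to_pairs
-- ===== SOURCE A (Python) =====
-- def flat_keypoints_to_pairs(keypoints_flat):
--     """Convert flat list [x1, y1, x2, y2, ...] to list of tuples [(x1,y1), (x2,y2), ...]"""
--     if len(keypoints_flat) % 2 != 0:
--         keypoints_flat = keypoints_flat[:len(keypoints_flat)//2*2]
--
--     pairs = []
--     for i in range(0, len(keypoints_flat), 2):
--         if i + 1 < len(keypoints_flat):
--             pairs.append((keypoints_flat[i], keypoints_flat[i+1]))
--     return pairs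
-- ===== SOURCE B (Python) =====
-- def flat_keypoints_to_pairs(keypoints_flat):
--     """Convert flat list [x1, y1, x2, y2, ...] to list of tuples [(x1,y1), (x2,y2), ...]"""
--     return list(zip(keypoints_flat[::2], keypoints_flat[1::2]))
-- ===== Notes on version B (the rewrite author's own statement) =====
-- stated objective: idiomatic
-- what changed: Replaced the explicit odd-length truncation plus index-stepping loop with zipping the even-indexed and odd-indexed stride slices; zip's shortest-sequence truncation handles odd lengths.
import Mathlib
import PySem

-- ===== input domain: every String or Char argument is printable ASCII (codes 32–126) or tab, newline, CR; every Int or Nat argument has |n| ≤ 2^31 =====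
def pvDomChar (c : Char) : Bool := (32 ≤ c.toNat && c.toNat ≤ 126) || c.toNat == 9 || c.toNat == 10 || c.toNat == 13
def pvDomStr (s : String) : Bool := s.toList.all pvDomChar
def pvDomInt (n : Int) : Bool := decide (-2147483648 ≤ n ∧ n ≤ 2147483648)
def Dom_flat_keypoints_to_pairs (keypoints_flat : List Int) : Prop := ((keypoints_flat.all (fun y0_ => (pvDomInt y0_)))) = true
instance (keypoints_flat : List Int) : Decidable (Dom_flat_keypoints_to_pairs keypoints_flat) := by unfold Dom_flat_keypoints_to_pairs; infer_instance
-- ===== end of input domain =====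

-- B replaces A's explicit truncation + index-stepping loop with zip of the two stride slices (idiomatic; same cost).


-- ===== PORT A =====
-- literal port of A: truncate to an even length when odd, then a step-2 index loop appending pairs
def flat_keypoints_to_pairs (keypoints_flat : List Int) : List (Int × Int) :=
  let kf : List Int :=
    if PySem.Int.mod (keypoints_flat.length : Int) 2 ≠ 0 then
      PySem.List.slice keypoints_flat none
        (some (PySem.Int.floordiv (keypoints_flat.length : Int) 2 * 2))
    else keypoints_flat
  (PySem.List.pyRange 0 (kf.length : Int) 2).foldl
    (fun pairs i =>
      if i + 1 < (kf.length : Int) then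
        pairs ++ [(PySem.List.pyGetD kf i 0, PySem.List.pyGetD kf (i + 1) 0)]
      else pairs) []

-- ===== PORT B =====
-- literal port of B: zip of keypoints_flat[::2] and keypoints_flat[1::2]
def flat_keypoints_to_pairs_alt (keypoints_flat : List Int) : List (Int × Int) :=
  List.zip ((PySem.List.slice? keypoints_flat none none 2).getD [])
           ((PySem.List.slice? keypoints_flat (some 1) none 2).getD [])

-- ===== PRECONDITION & SPEC =====
def Spec_flat_keypoints_to_pairs (keypoints_flat : List Int) (out : List (Int × Int)) : Prop := out = flat_keypoints_to_pairs_alt keypoints_flat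
instance (keypoints_flat : List Int) (out : List (Int × Int)) : Decidable (Spec_flat_keypoints_to_pairs keypoints_flat out) := by unfold Spec_flat_keypoints_to_pairs; infer_instance

-- ===== CLAIM (what is proved, stated in full; the proofs are below) =====
def Claim_equal_flat_keypoints_to_pairs : Prop := ∀ (keypoints_flat : List Int), Dom_flat_keypoints_to_pairs keypoints_flat → Spec_flat_keypoints_to_pairs keypoints_flat (flat_keypoints_to_pairs keypoints_flat)

-- ===== LEMMAS AND PROOFS =====

-- canonical form both ports are reduced to: the k-th pair is (xs[2k], xs[2k+1]), for k < len/2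
def pvPairs (xs : List Int) : List (Int × Int) :=
  (List.range (xs.length / 2)).map (fun k => (xs.getD (2 * k) 0, xs.getD (2 * k + 1) 0))

lemma pv_evens (xs : List Int) :
    PySem.List.slice? xs none none 2 =
      some ((List.range ((xs.length + 1) / 2)).map (fun k => xs.getD (2 * k) 0)) := by
  simp only [PySem.List.slice?, PySem.List.sliceIndices]
  norm_num
  rw [show (if 0 < xs.length then (((xs.length : Int) + 2 - 1) / 2).toNat else 0) = (xs.length + 1) / 2 by split <;> omega]
  rw [List.filterMap_congr (g := fun k => some (xs.getD (2 * k) 0)) ?_]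
  · simp
  · intro k hk
    simp only [List.mem_range] at hk
    have h2 : 2 * k < xs.length := by omega
    rw [show ((2 * (k:Int)).toNat) = 2 * k by omega]
    simp [List.getElem?_eq_getElem h2, List.getD]

lemma pv_odds (xs : List Int) :
    PySem.List.slice? xs (some 1) none 2 =
      some ((List.range (xs.length / 2)).map (fun k => xs.getD (2 * k + 1) 0)) := by
  simp only [PySem.List.slice?, PySem.List.sliceIndices]
  norm_num
  by_cases hL : xs.length = 0
  · simp [hL]
  · rw [show min 1 (xs.length : Int) = 1 by omega]
    rw [show (if 1 < xs.length then (((xs.length : Int) - 1 + 2 - 1) / 2).toNat else 0) = xs.length / 2 by split <;> omega]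
    rw [List.filterMap_congr (g := fun k => some (xs.getD (2 * k + 1) 0)) ?_]
    · simp
    · intro k hk
      simp only [List.mem_range] at hk
      have h2 : 2 * k + 1 < xs.length := by omega
      rw [show ((1 + 2 * (k:Int)).toNat) = 2 * k + 1 by omega]
      simp [List.getElem?_eq_getElem h2, List.getD]

lemma pv_alt_eq (xs : List Int) : flat_keypoints_to_pairs_alt xs = pvPairs xs := by
  unfold flat_keypoints_to_pairs_alt
  rw [pv_evens, pv_odds]
  simp only [Option.getD_some, pvPairs]
  apply List.ext_getElem
  · simp; omega
  · intro i h1 h2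
    simp [List.getElem_zip]

-- A's loop body on an even-length list produces exactly the canonical pairs
lemma pv_body_eq (ys : List Int) (hev : 2 ∣ ys.length) :
    (PySem.List.pyRange 0 (ys.length : Int) 2).foldl
      (fun pairs i =>
        if i + 1 < (ys.length : Int) then
          pairs ++ [(PySem.List.pyGetD ys i 0, PySem.List.pyGetD ys (i + 1) 0)]
        else pairs) [] = pvPairs ys := by
  rw [PySem.List.pyRange_of_pos 0 (ys.length : Int) (by norm_num), List.foldl_map]
  rw [show (if (0:Int) < ys.length then (((ys.length:Int) - 0 + 2 - 1) / 2).toNat else 0) = ys.length / 2 by split <;> omega]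
  rw [PySem.List.foldl_congr_mem _ _
      (fun pairs (k : Nat) => pairs ++ [(ys.getD (2 * k) 0, ys.getD (2 * k + 1) 0)]) _ ?_]
  · exact PySem.List.foldl_append_singleton_eq_map _ _ []
  · intro acc k hk
    simp only [List.mem_range] at hk
    rw [if_pos (by omega)]
    rw [PySem.List.pyGetD_of_nonneg _ _ (by omega : (0:Int) ≤ 0 + 2*(k:Int)), PySem.List.pyGetD_of_nonneg _ _ (by omega : (0:Int) ≤ 0 + 2*(k:Int) + 1)]
    norm_num
    rw [show ((2 * (k:Int)).toNat) = 2 * k by omega, show ((2 * (k:Int) + 1).toNat) = 2 * k + 1 by omega]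
    exact ⟨rfl, rfl⟩

lemma pvPairs_take (xs : List Int) : pvPairs (xs.take (2 * (xs.length / 2))) = pvPairs xs := by
  unfold pvPairs
  have hl : (xs.take (2 * (xs.length / 2))).length = 2 * (xs.length / 2) := by
    simp; omega
  rw [hl, show 2 * (xs.length / 2) / 2 = xs.length / 2 by omega]
  apply List.map_congr_left
  intro k hk
  simp only [List.mem_range] at hk
  simp only [List.getD_eq_getElem?_getD, List.getElem?_take]
  rw [if_pos (by omega), if_pos (by omega)]

lemma pv_a_eq (xs : List Int) : flat_keypoints_to_pairs xs = pvPairs xs := by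
  unfold flat_keypoints_to_pairs
  have hkf : (if PySem.Int.mod (xs.length : Int) 2 ≠ 0 then
      PySem.List.slice xs none (some (PySem.Int.floordiv (xs.length : Int) 2 * 2))
    else xs) = xs.take (2 * (xs.length / 2)) := by
    by_cases h : xs.length % 2 = 0
    · rw [if_neg (by simp; omega)]
      rw [List.take_of_length_le (by omega)]
    · rw [if_pos (by simp; omega)]
      rw [show PySem.Int.floordiv ((xs.length : Int)) 2 = ((xs.length / 2 : Nat) : Int) by exact_mod_cast PySem.Int.floordiv_natCast xs.length 2]
      rw [PySem.List.slice_to xs (by positivity)]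
      rw [show ((((xs.length / 2 : Nat) : Int)) * 2).toNat = 2 * (xs.length / 2) by omega]
  simp only [hkf]
  rw [pv_body_eq _ (by simp; omega), pvPairs_take]

-- ===== VERDICT (by name: the statement is the Claim_ definition above) =====
theorem flat_keypoints_to_pairs_spec : Claim_equal_flat_keypoints_to_pairs := by
  intro xs _
  unfold Spec_flat_keypoints_to_pairs
  rw [pv_alt_eq, pv_a_eq]
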